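-- pv_equiv track=rewrite | github.com/Aibrec/advent-2024 | Day15b/main.py | move_barrel
-- ===== SOURCE A (Python) =====
-- def add_dir(dir, coord):
--     return dir[0] + coord[0], dir[1] + coord[1]
--
-- def get_coord(coord, warehouse):
--     return warehouse[coord[0]][coord[1]]
--
-- def get_barrel_sides(coord, barrel_char):
--     match barrel_char:
--         case ']':
--             return add_dir((0,-1), coord), coord
--         case '[':
--             return coord, add_dir((0, 1), coord)
--         case _:
--             raise ValueError
--
-- def move_barrel(barrel, barrel_char, dir, warehouse):
--     left_coord, right_coord = get_barrel_sides(barrel, barrel_char)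
--     to_move = {left_coord, right_coord}
--     moves = {}
--     cords_moving = set()
--     while to_move:
--         coord = to_move.pop()
--         if coord not in cords_moving:
--             next_coord = add_dir(dir, coord)
--             char = get_coord(next_coord, warehouse)
--             match char:
--                 case '[' | ']':
--                     left, right = get_barrel_sides(next_coord, char)
--                     match dir:
--                         case (0,-1): # Pushing from the left
--                             moves[left] = ']'
--                             to_move.add(left)
--                         case (0,1): # Pushing from the right
--                             moves[right] = '['
--                             to_move.add(right)
--                         case _: # Pushing up or down
--                             to_move.add(left)
--                             to_move.add(right)
--                 case '#':
--                     # Blocked space, can't move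
--                     return False
--
--             moves[next_coord] = get_coord(coord, warehouse)
--             cords_moving.add(coord)
--
--     # Everything can be moved, so move it all
--     for coord, char in moves.items():
--         warehouse[coord[0]][coord[1]] = char
--
--     # Set any coord that moved but wasn't filled to empty
--     for coord in cords_moving:
--         if coord not in moves:
--             warehouse[coord[0]][coord[1]] = '.'
--
--     return True
-- ===== SOURCE B (Python) =====
-- def move_barrel(barrel, barrel_char, dir, warehouse):
--     # Recursive validate-and-collect: DFS gathers the moving cells and the writes
--     # they imply; the warehouse is touched only after the whole chain is cleared.
--     if barrel_char == ']':
--         seed_left, seed_right = (barrel[0], barrel[1] - 1), barrel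
--     elif barrel_char == '[':
--         seed_left, seed_right = barrel, (barrel[0], barrel[1] + 1)
--     else:
--         raise ValueError
--     visited = []
--     writes = []
--
--     def visit(c):
--         if c in visited:
--             return True
--         visited.append(c)
--         nc = (c[0] + dir[0], c[1] + dir[1])
--         ch = warehouse[nc[0]][nc[1]]
--         if ch == '#':
--             return False
--         children = []
--         if ch == '[' or ch == ']':
--             if ch == ']':
--                 side_l, side_r = (nc[0], nc[1] - 1), nc
--             else:
--                 side_l, side_r = nc, (nc[0], nc[1] + 1)
--             if dir == (0, -1):
--                 writes.append((side_l, ']'))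
--                 children = [side_l]
--             elif dir == (0, 1):
--                 writes.append((side_r, '['))
--                 children = [side_r]
--             else:
--                 children = [side_r, side_l]
--         writes.append((nc, warehouse[c[0]][c[1]]))
--         for child in children:
--             if not visit(child):
--                 return False
--         return True
--
--     if not (visit(seed_left) and visit(seed_right)):
--         return False
--     for (r, col), ch in writes:
--         warehouse[r][col] = ch
--     targets = [t for t, _ in writes]
--     for (r, col) in visited:
--         if (r, col) not in targets:
--             warehouse[r][col] = '.'
--     return True
-- ===== Notes on version B (the rewrite author's own statement) =====
-- stated objective: alternative
-- what changed: Replaces A's imperative worklist-set loop that interleaves exploration with building a moves dict (plus a final vacate scan over the dict keys) by a recursive validate-and-collect visit: a DFS gathers the moving cells and their pending writes first, and the warehouse is touched only after the whole chain is known to be unblocked.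
import Mathlib
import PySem

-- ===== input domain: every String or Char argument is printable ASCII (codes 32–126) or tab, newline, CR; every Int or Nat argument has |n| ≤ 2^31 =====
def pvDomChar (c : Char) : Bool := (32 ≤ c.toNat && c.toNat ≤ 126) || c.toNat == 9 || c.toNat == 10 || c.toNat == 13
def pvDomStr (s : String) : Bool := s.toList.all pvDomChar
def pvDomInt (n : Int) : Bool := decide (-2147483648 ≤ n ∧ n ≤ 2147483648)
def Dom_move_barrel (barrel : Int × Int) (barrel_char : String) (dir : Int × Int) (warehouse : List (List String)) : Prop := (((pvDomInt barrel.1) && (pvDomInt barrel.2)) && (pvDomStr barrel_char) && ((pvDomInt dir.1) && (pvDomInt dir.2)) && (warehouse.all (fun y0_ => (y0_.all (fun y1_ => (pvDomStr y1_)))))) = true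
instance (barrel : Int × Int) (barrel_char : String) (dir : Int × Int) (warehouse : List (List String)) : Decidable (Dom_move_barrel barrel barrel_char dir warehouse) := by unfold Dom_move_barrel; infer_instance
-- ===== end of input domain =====

-- B replaces A's worklist/moves-dict loop by a recursive validate-and-collect pass (a write
-- list applied only after the whole chain is cleared); both mutate the warehouse in Python —
-- the equivalence proved here is about the RETURN value only (the Python grids were also
-- observed equal wherever both return).

-- ===== PORT A =====
-- add_dir
def pvAddDir (d : Int × Int) (c : Int × Int) : Int × Int := (d.1 + c.1, d.2 + c.2)
-- get_coord; none = IndexError (excluded by Pre_)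
def pvGetCoord? (c : Int × Int) (wh : List (List String)) : Option String :=
  (PySem.List.pyGet? wh c.1).bind (fun row => PySem.List.pyGet? row c.2)
-- get_barrel_sides; none = ValueError (excluded by Pre_)
def pvSides? (c : Int × Int) (ch : String) : Option ((Int × Int) × (Int × Int)) :=
  if ch = "]" then some (pvAddDir (0, -1) c, c)
  else if ch = "[" then some (c, pvAddDir (0, 1) c)
  else none

-- A's while-loop.  to_move is a Python set used as a worklist: its pop order is
-- unspecified, so it is modelled as a stack (pop = head, add = prepend; a duplicate add is
-- harmless because popped coords already in cords_moving are skipped).  fuel is a totality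
-- device consumed once per pop; the ports of A and B use the same fuel expression.
def pvLoopA (dir : Int × Int) (wh : List (List String)) :
    Nat → List (Int × Int) → PySem.Dict (Int × Int) String → PySem.Set (Int × Int) → Bool
  | _, [], _, _ => true
  | 0, _ :: _, _, _ => false
  | Nat.succ n, c :: rest, moves, cords =>
    if PySem.Set.contains cords c then pvLoopA dir wh n rest moves cords
    else
      let nc := pvAddDir dir c
      match pvGetCoord? nc wh with
      | none => false                           -- IndexError in get_coord (outside Pre_)
      | some ch =>
        if ch = "#" then false                  -- blocked, return False
        else
          let (toMove, moves1) :=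
            if ch = "[" ∨ ch = "]" then
              match pvSides? nc ch with
              | some (l, r) =>
                if dir = ((0 : Int), (-1 : Int)) then (l :: rest, moves.insert l "]")
                else if dir = ((0 : Int), (1 : Int)) then (r :: rest, moves.insert r "[")
                else (r :: l :: rest, moves)    -- add(left); add(right): LIFO pops right first
              | none => (rest, moves)           -- unreachable: ch is "[" or "]"
            else (rest, moves)
          match pvGetCoord? c wh with
          | none => false                       -- IndexError in get_coord (outside Pre_)
          | some cch =>
            pvLoopA dir wh n toMove (moves1.insert nc cch) (PySem.Set.add cords c)

def move_barrel (barrel : Int × Int) (barrel_char : String) (dir : Int × Int) (warehouse : List (List String)) : Bool :=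
  match pvSides? barrel barrel_char with
  | none => false                               -- ValueError (outside Pre_)
  | some (l, r) =>
    pvLoopA dir warehouse (4 * warehouse.length * (warehouse.headD []).length + 16)
      (PySem.Set.ofList [l, r]) PySem.Dict.empty PySem.Set.empty

-- ===== PORT B =====
-- B's recursive `visit`.  It returns the updated visited list together with the remaining
-- fuel (fuel is a totality device, one unit per call, threaded through the recursion; the
-- bound m ≤ fuel is what makes the sibling call terminate); none = blocked / IndexError.
-- The writes list of Source B only feeds the in-place grid update, which the Bool result never
-- reads; its read of warehouse[c] can raise, so that read is kept.
def pvVisitB (dir : Int × Int) (wh : List (List String)) :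
    (fuel : Nat) → (Int × Int) → List (Int × Int) →
    Option ({m : Nat // m ≤ fuel} × List (Int × Int))
  | 0, _, _ => none
  | Nat.succ n, c, vis =>
    if vis.contains c then some (⟨n, Nat.le_succ n⟩, vis)
    else
      let vis' := vis ++ [c]                    -- visited.append(c)
      let nc := (c.1 + dir.1, c.2 + dir.2)
      match (PySem.List.pyGet? wh nc.1).bind (fun row => PySem.List.pyGet? row nc.2) with
      | none => none                            -- IndexError (outside Pre_)
      | some ch =>
        if ch = "#" then none
        else
          match (PySem.List.pyGet? wh c.1).bind (fun row => PySem.List.pyGet? row c.2) with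
          | none => none                        -- IndexError reading warehouse[c] (outside Pre_)
          | some _ =>                           -- value goes to the writes list only
            if ch = "[" ∨ ch = "]" then
              let l := if ch = "]" then (nc.1, nc.2 - 1) else nc
              let r := if ch = "]" then nc else (nc.1, nc.2 + 1)
              if dir = ((0 : Int), (-1 : Int)) then
                (pvVisitB dir wh n l vis').map
                  (fun p => (⟨p.1.1, Nat.le_succ_of_le p.1.2⟩, p.2))
              else if dir = ((0 : Int), (1 : Int)) then
                (pvVisitB dir wh n r vis').map
                  (fun p => (⟨p.1.1, Nat.le_succ_of_le p.1.2⟩, p.2))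
              else
                match pvVisitB dir wh n r vis' with
                | none => none
                | some (⟨m2, h2⟩, v2) =>
                  match pvVisitB dir wh m2 l v2 with
                  | none => none
                  | some (⟨m3, h3⟩, v3) =>
                    some (⟨m3, by omega⟩, v3)
            else some (⟨n, Nat.le_succ n⟩, vis')
termination_by fuel => fuel
decreasing_by all_goals omega

def pvGoB (dir : Int × Int) (wh : List (List String)) (sl sr : Int × Int) : Bool :=
  match pvVisitB dir wh (4 * wh.length * (wh.headD []).length + 16) sl [] with
  | none => false                               -- blocked (or IndexError, outside Pre_)
  | some (⟨m, _⟩, vis) => (pvVisitB dir wh m sr vis).isSome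

def move_barrel_alt (barrel : Int × Int) (barrel_char : String) (dir : Int × Int) (warehouse : List (List String)) : Bool :=
  if barrel_char = "]" then pvGoB dir warehouse (barrel.1, barrel.2 - 1) barrel
  else if barrel_char = "[" then pvGoB dir warehouse barrel (barrel.1, barrel.2 + 1)
  else false                                    -- ValueError (outside Pre_)

-- ===== PRECONDITION & SPEC =====
-- Readers of the input used only by Pre_ (closed-form shape conditions, not a simulation).
def pvReadOk (wh : List (List String)) (s : Int × Int) : Bool :=
  ((PySem.List.pyGet? wh s.1).bind (fun row => PySem.List.pyGet? row s.2)).isSome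
def pvAhead (dir : Int × Int) (wh : List (List String)) (s : Int × Int) : Option String :=
  (PySem.List.pyGet? wh (s.1 + dir.1)).bind (fun row => PySem.List.pyGet? row (s.2 + dir.2))
-- the cell ahead of seed s is readable and not a box half, and either it is a wall
-- (A answers False before reading s) or s itself is readable
def pvSeedFlat (dir : Int × Int) (wh : List (List String)) (s : Int × Int) : Bool :=
  match pvAhead dir wh s with
  | none => false
  | some ch => !(ch = "[" || ch = "]") && (ch = "#" || pvReadOk wh s)
-- a rectangular warehouse fully framed by '#' walls (the puzzle's shape): every chain of
-- boxes is stopped by the frame, so all of A's index accesses stay in range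
def pvWalled (barrel : Int × Int) (barrel_char : String) (dir : Int × Int) (wh : List (List String)) : Prop :=
  (dir = ((0 : Int), (1 : Int)) ∨ dir = ((0 : Int), (-1 : Int)) ∨
    dir = ((1 : Int), (0 : Int)) ∨ dir = ((-1 : Int), (0 : Int))) ∧
  3 ≤ wh.length ∧ 4 ≤ (wh.headD []).length ∧
  (∀ row ∈ wh, row.length = (wh.headD []).length) ∧
  (∀ s ∈ wh.headD [], s = "#") ∧
  (∀ s ∈ wh.getLastD [], s = "#") ∧
  (∀ row ∈ wh, row.headD "" = "#" ∧ row.getLastD "" = "#") ∧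
  1 ≤ barrel.1 ∧ barrel.1 ≤ (wh.length : Int) - 2 ∧
  (if barrel_char = "]" then
     2 ≤ barrel.2 ∧ barrel.2 ≤ ((wh.headD []).length : Int) - 2
   else
     1 ≤ barrel.2 ∧ barrel.2 ≤ ((wh.headD []).length : Int) - 3)

-- Pre_ excludes the inputs on which A raises: ValueError (barrel_char not a box half) and
-- IndexError during the chain walk.  The exact no-IndexError condition is a reachability
-- property of the push chain, so Pre_ admits the two closed-form shapes that guarantee it:
-- either no box half sits ahead of the barrel (the walk stops at once: pvSeedFlat for both
-- halves), or the warehouse is a '#'-framed rectangle with the barrel inside the frame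
-- (pvWalled).  It therefore also excludes some inputs on which A happens to return, e.g.
-- an unframed grid whose longer box chain still stops in range; A and B were observed to
-- agree on those as well (the proved lock-step equality holds for every input; Pre_'s only
-- role is Python-faithfulness of the ports, which map the raising reads to False).
def Pre_move_barrel (barrel : Int × Int) (barrel_char : String) (dir : Int × Int) (warehouse : List (List String)) : Prop :=
  (barrel_char = "[" ∨ barrel_char = "]") ∧
  ((pvSeedFlat dir warehouse (if barrel_char = "]" then (barrel.1, barrel.2 - 1) else barrel) ∧
     pvSeedFlat dir warehouse (if barrel_char = "]" then barrel else (barrel.1, barrel.2 + 1))) ∨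
    pvWalled barrel barrel_char dir warehouse)
instance (barrel : Int × Int) (barrel_char : String) (dir : Int × Int) (warehouse : List (List String)) : Decidable (Pre_move_barrel barrel barrel_char dir warehouse) := by unfold Pre_move_barrel pvWalled; infer_instance

def pvWitness_move_barrel : (Int × Int) × String × (Int × Int) × List (List String) :=
  ((1, 2), "[", (0, 1),
   [["#", "#", "#", "#", "#", "#"],
    ["#", ".", "[", "]", ".", "#"],
    ["#", ".", ".", ".", ".", "#"],
    ["#", "#", "#", "#", "#", "#"]])

def Spec_move_barrel (barrel : Int × Int) (barrel_char : String) (dir : Int × Int) (warehouse : List (List String)) (out : Bool) : Prop := out = move_barrel_alt barrel barrel_char dir warehouse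
instance (barrel : Int × Int) (barrel_char : String) (dir : Int × Int) (warehouse : List (List String)) (out : Bool) : Decidable (Spec_move_barrel barrel barrel_char dir warehouse out) := by unfold Spec_move_barrel; infer_instance

-- ===== CLAIM (what is proved, stated in full; the proofs are below) =====
def Claim_equal_move_barrel : Prop := ∀ (barrel : Int × Int) (barrel_char : String) (dir : Int × Int) (warehouse : List (List String)), Dom_move_barrel barrel barrel_char dir warehouse → Pre_move_barrel barrel barrel_char dir warehouse → Spec_move_barrel barrel barrel_char dir warehouse (move_barrel barrel barrel_char dir warehouse)

-- ===== LEMMAS AND PROOFS =====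

-- Sequencing B's visit over a list of cells, threading the fuel (proof-side only).
def pvChainOk (dir : Int × Int) (wh : List (List String)) :
    Nat → List (Int × Int) → List (Int × Int) → Bool
  | _, [], _ => true
  | n, c :: cs, vis =>
    match pvVisitB dir wh n c vis with
    | none => false
    | some (⟨m, _⟩, v) => pvChainOk dir wh m cs v

-- Lock-step simulation: A's worklist loop computes exactly B's chained visits; both consume
-- one fuel unit per pop / per call, so the equality holds for EVERY fuel value.
theorem pvLoopA_eq_chain (dir : Int × Int) (wh : List (List String)) :
    ∀ (n : Nat) (wl : List (Int × Int)) (moves : PySem.Dict (Int × Int) String)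
      (cords : List (Int × Int)),
      pvLoopA dir wh n wl moves cords = pvChainOk dir wh n wl cords := by
  intro n
  induction n with
  | zero =>
    intro wl moves cords
    cases wl <;> simp [pvLoopA, pvChainOk, pvVisitB]
  | succ n ih =>
    intro wl moves cords
    cases wl with
    | nil => simp [pvLoopA, pvChainOk]
    | cons c rest =>
      rw [pvChainOk, pvLoopA, pvVisitB]
      by_cases hmem : cords.contains c
      · simp only [PySem.Set.contains, hmem, if_pos]
        exact ih rest moves cords
      · simp only [PySem.Set.contains, hmem, if_neg, Bool.false_eq_true, not_false_iff]
        have hadd : PySem.Set.add cords c = cords ++ [c] := by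
          simp only [PySem.Set.add, PySem.Set.contains]
          rw [if_neg]; simpa using hmem
        have hnc : pvAddDir dir c = (c.1 + dir.1, c.2 + dir.2) := by
          simp [pvAddDir, Int.add_comm]
        rw [hnc, hadd]
        simp only [pvGetCoord?]
        cases hg : (PySem.List.pyGet? wh (c.1 + dir.1)).bind
            (fun row => PySem.List.pyGet? row (c.2 + dir.2)) with
        | none => rfl
        | some ch =>
          by_cases hsharp : ch = "#"
          · simp [hsharp]
          · simp only [hsharp, if_neg, not_false_iff]
            cases hc : (PySem.List.pyGet? wh c.1).bind (fun row => PySem.List.pyGet? row c.2) with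
            | none => rfl
            | some cch =>
              by_cases hbox : ch = "[" ∨ ch = "]"
              · have hsides : pvSides? (c.1 + dir.1, c.2 + dir.2) ch =
                    some ((if ch = "]" then (c.1 + dir.1, c.2 + dir.2 - 1) else (c.1 + dir.1, c.2 + dir.2)),
                          (if ch = "]" then (c.1 + dir.1, c.2 + dir.2) else (c.1 + dir.1, c.2 + dir.2 + 1))) := by
                  rcases hbox with h | h <;> subst h <;>
                    simp [pvSides?, pvAddDir, Prod.ext_iff] <;> omega
                simp only [hbox, if_pos, hsides]
                by_cases hd1 : dir = ((0 : Int), (-1 : Int))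
                · simp only [if_pos hd1]
                  rw [ih, pvChainOk]
                  cases h2 : pvVisitB dir wh n
                      (if ch = "]" then (c.1 + dir.1, c.2 + dir.2 - 1) else (c.1 + dir.1, c.2 + dir.2))
                      (cords ++ [c]) with
                  | none => simp
                  | some p => rcases p with ⟨⟨m, hm⟩, v⟩; simp
                · by_cases hd2 : dir = ((0 : Int), (1 : Int))
                  · simp only [if_neg hd1, if_pos hd2]
                    rw [ih, pvChainOk]
                    cases h2 : pvVisitB dir wh n
                        (if ch = "]" then (c.1 + dir.1, c.2 + dir.2) else (c.1 + dir.1, c.2 + dir.2 + 1))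
                        (cords ++ [c]) with
                    | none => simp
                    | some p => rcases p with ⟨⟨m, hm⟩, v⟩; simp
                  · simp only [if_neg hd1, if_neg hd2]
                    rw [ih, pvChainOk]
                    cases h2 : pvVisitB dir wh n
                        (if ch = "]" then (c.1 + dir.1, c.2 + dir.2) else (c.1 + dir.1, c.2 + dir.2 + 1))
                        (cords ++ [c]) with
                    | none => simp
                    | some p =>
                      rcases p with ⟨⟨m2, hm2⟩, v2⟩
                      simp only [pvChainOk]
                      cases h3 : pvVisitB dir wh m2
                          (if ch = "]" then (c.1 + dir.1, c.2 + dir.2 - 1) else (c.1 + dir.1, c.2 + dir.2))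
                          v2 with
                      | none => simp
                      | some q => rcases q with ⟨⟨m3, hm3⟩, v3⟩; simp
              · simp only [if_neg hbox]
                rw [ih]

theorem move_barrel_eq_alt (barrel : Int × Int) (barrel_char : String) (dir : Int × Int) (warehouse : List (List String)) :
    move_barrel barrel barrel_char dir warehouse = move_barrel_alt barrel barrel_char dir warehouse := by
  unfold move_barrel move_barrel_alt pvGoB
  by_cases h1 : barrel_char = "]"
  · rw [pvSides?, if_pos h1, if_pos h1]
    have hl : pvAddDir (0, -1) barrel = (barrel.1, barrel.2 - 1) := by
      simp [pvAddDir, Prod.ext_iff]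
      omega
    have hof : PySem.Set.ofList [(barrel.1, barrel.2 - 1), barrel] = [(barrel.1, barrel.2 - 1), barrel] := by
      simp [PySem.Set.ofList, PySem.Set.add, PySem.Set.contains, Prod.ext_iff]
      omega
    simp only [hl, hof, PySem.Set.empty, pvLoopA_eq_chain, pvChainOk]
    cases h2 : pvVisitB dir warehouse (4 * warehouse.length * (warehouse.headD []).length + 16)
        (barrel.1, barrel.2 - 1) [] with
    | none => rfl
    | some p =>
      rcases p with ⟨⟨m, hm⟩, v⟩
      cases h3 : pvVisitB dir warehouse m barrel v with
      | none => simp [h3]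
      | some q => simp [h3]
  · rw [pvSides?, if_neg h1, if_neg h1]
    by_cases h2 : barrel_char = "["
    · rw [if_pos h2, if_pos h2]
      have hr : pvAddDir (0, 1) barrel = (barrel.1, barrel.2 + 1) := by
        simp [pvAddDir, Prod.ext_iff]
        omega
      have hof : PySem.Set.ofList [barrel, (barrel.1, barrel.2 + 1)] = [barrel, (barrel.1, barrel.2 + 1)] := by
        simp [PySem.Set.ofList, PySem.Set.add, PySem.Set.contains, Prod.ext_iff]
      simp only [hr, hof, PySem.Set.empty, pvLoopA_eq_chain, pvChainOk]
      cases h2' : pvVisitB dir warehouse (4 * warehouse.length * (warehouse.headD []).length + 16)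
          barrel [] with
      | none => rfl
      | some p =>
        rcases p with ⟨⟨m, hm⟩, v⟩
        cases h3 : pvVisitB dir warehouse m (barrel.1, barrel.2 + 1) v with
        | none => simp [h3]
        | some q => simp [h3]
    · rw [if_neg h2, if_neg h2]

-- ===== VERDICT (by name: the statement is the Claim_ definition above) =====
theorem move_barrel_spec : Claim_equal_move_barrel := by
  intro barrel barrel_char dir warehouse _hdom _hpre
  unfold Spec_move_barrel
  exact move_barrel_eq_alt barrel barrel_char dir warehouse
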